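-- pv_equiv track=rewrite | github.com/LeoSpallino/adventofcode | src/2023/14/main.py | tiltRocks
-- ===== SOURCE A (Python) =====
-- def tiltRocks(line, dir):
--     swaps = True
--     if dir == "WEST" or dir == "NORTH":
--         line = line[::-1]
--
--     while swaps:
--         swaps = False
--         for i in range(len(line) - 1):
--             if line[i] == "O" and line[i + 1] == ".":
--                 line[i], line[i + 1] = line[i + 1], line[i]
--                 swaps = True
--
--     if dir == "WEST" or dir == "NORTH":
--         return line[::-1]
--
--     return line
-- ===== SOURCE B (Python) =====
-- def tiltRocks(line, dir):
--     # Single linear pass: count rocks/dots per wall-delimited segment, emit dots then rocks.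
--     # (A mutates the caller's list in place; B does not — equivalence is about the return value.)
--     rev = dir == "WEST" or dir == "NORTH"
--     seq = line[::-1] if rev else line
--     out = []
--     dots = rocks = 0
--     for x in seq:
--         if x == "O":
--             rocks += 1
--         elif x == ".":
--             dots += 1
--         else:
--             out.extend(["."] * dots + ["O"] * rocks)
--             out.append(x)
--             dots = rocks = 0
--     out.extend(["."] * dots + ["O"] * rocks)
--     return out[::-1] if rev else out
-- ===== Notes on version B (the rewrite author's own statement) =====
-- stated objective: alternative
-- what changed: Replaced the bubble-to-fixpoint while-loop of adjacent swaps with a single counting pass that tallies rocks and dots per wall-delimited segment and emits them in order (A also mutates the input list in place; B does not - the claim is about the return value).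
import Mathlib
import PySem

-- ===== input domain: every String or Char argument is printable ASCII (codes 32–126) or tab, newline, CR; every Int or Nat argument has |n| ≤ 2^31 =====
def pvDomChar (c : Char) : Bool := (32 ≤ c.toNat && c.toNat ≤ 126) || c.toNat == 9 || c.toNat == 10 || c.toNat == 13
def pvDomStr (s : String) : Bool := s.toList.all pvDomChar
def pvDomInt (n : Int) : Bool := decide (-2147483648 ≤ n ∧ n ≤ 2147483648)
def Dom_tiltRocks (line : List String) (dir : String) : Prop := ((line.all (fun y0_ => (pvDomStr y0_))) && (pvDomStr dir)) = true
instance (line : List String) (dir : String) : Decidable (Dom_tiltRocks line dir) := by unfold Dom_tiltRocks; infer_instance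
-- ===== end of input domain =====

-- B replaces A's repeated bubble passes with one counting pass per wall-delimited segment
-- (A mutates its argument list in place; the equivalence claimed here is about the return value).

-- ===== PORT A =====
-- one in-place bubble pass of A's inner `for i in range(len(line)-1)` loop:
-- after a swap the next comparison sees the moved "O" (Python reads the mutated list)
def onePass : List String → List String × Bool
  | [] => ([], false)
  | [x] => ([x], false)
  | x :: y :: rest =>
    if x = "O" ∧ y = "." then
      ("." :: (onePass ("O" :: rest)).1, true)
    else
      let r := onePass (y :: rest)
      (x :: r.1, r.2)
termination_by l => l.length

-- termination measure for A's `while swaps` loop: number of ("O" before ".") adjacent-or-not inversions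
def phiA : List String → Nat
  | [] => 0
  | x :: xs => (if x = "O" then xs.count "." else 0) + phiA xs

-- measure fact the port's termination proof (decreasing_by of loopA) cites by name
theorem onePass_measure : ∀ l : List String,
    (onePass l).1.count "." = l.count "." ∧
    phiA (onePass l).1 + (if (onePass l).2 then 1 else 0) ≤ phiA l := by
  intro l
  fun_induction onePass l with
  | case1 => simp [phiA]
  | case2 x => simp [phiA]
  | case3 x y rest h ih =>
    obtain ⟨hx, hy⟩ := h; subst hx; subst hy
    obtain ⟨hc, hp⟩ := ih
    refine ⟨?_, ?_⟩
    · simp only [List.count_cons] at *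
      simp_all
    · simp only [phiA, List.count_cons] at *
      cases h2 : (onePass ("O" :: rest)).2 <;> rw [h2] at hp <;> simp_all <;> omega
  | case4 x y rest _ r ih =>
    have hr : r = onePass (y :: rest) := rfl
    obtain ⟨hc, hp⟩ := ih
    rw [hr]
    refine ⟨?_, ?_⟩
    · simp only [List.count_cons] at *
      simp_all
    · simp only [phiA, List.count_cons] at *
      rw [hc]
      cases h2 : (onePass (y :: rest)).2 <;> rw [h2] at hp <;>
        by_cases hx : x = "O" <;> by_cases hy : y = "." <;> simp_all

-- A's `while swaps:` loop
def loopA (l : List String) : List String :=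
  let r := onePass l
  if h : r.2 then loopA r.1 else r.1
termination_by phiA l
decreasing_by
  have hm := (onePass_measure l).2
  rw [h] at hm
  simp at hm
  omega

def tiltRocks (line : List String) (dir : String) : List String :=
  if dir = "WEST" ∨ dir = "NORTH" then (loopA line.reverse).reverse
  else loopA line

-- ===== PORT B =====
def flushSeg (d o : Nat) : List String := List.replicate d "." ++ List.replicate o "O"

-- B's single counting pass: dots/rocks counters per segment, flushed at each wall and at the end
def segGo : Nat → Nat → List String → List String
  | d, o, [] => flushSeg d o
  | d, o, x :: xs =>
    if x = "O" then segGo d (o + 1) xs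
    else if x = "." then segGo (d + 1) o xs
    else flushSeg d o ++ x :: segGo 0 0 xs

def tiltRocks_alt (line : List String) (dir : String) : List String :=
  if dir = "WEST" ∨ dir = "NORTH" then (segGo 0 0 line.reverse).reverse
  else segGo 0 0 line

-- ===== PRECONDITION & SPEC =====
def Spec_tiltRocks (line : List String) (dir : String) (out : List String) : Prop := out = tiltRocks_alt line dir
instance (line : List String) (dir : String) (out : List String) : Decidable (Spec_tiltRocks line dir out) := by unfold Spec_tiltRocks; infer_instance

-- ===== CLAIM (what is proved, stated in full; the proofs are below) =====
def Claim_equal_tiltRocks : Prop := ∀ (line : List String) (dir : String), Dom_tiltRocks line dir → Spec_tiltRocks line dir (tiltRocks line dir)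

-- ===== LEMMAS AND PROOFS =====

-- "no 'O' immediately followed by '.'": characterises the fixpoints of onePass
def noAdj : List String → Prop
  | x :: y :: rest => ¬(x = "O" ∧ y = ".") ∧ noAdj (y :: rest)
  | _ => True

theorem onePass_false_fix : ∀ l : List String,
    (onePass l).2 = false → (onePass l).1 = l ∧ noAdj l := by
  intro l
  fun_induction onePass l with
  | case1 => simp [noAdj]
  | case2 x => simp [noAdj]
  | case3 x y rest h ih => intro hf; simp at hf
  | case4 x y rest h r ih =>
    intro hf
    have hr : r = onePass (y :: rest) := rfl
    simp only [hr] at hf ⊢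
    obtain ⟨h1, h2⟩ := ih (by simpa using hf)
    exact ⟨by rw [h1], h, h2⟩

theorem segGo_noAdj : ∀ (m : List String) (d o : Nat), noAdj m →
    (o = 0 ∨ m.head? ≠ some ".") →
    segGo d o m = List.replicate d "." ++ List.replicate o "O" ++ m := by
  intro m
  induction m with
  | nil => intro d o _ _; simp [segGo, flushSeg]
  | cons x xs ih =>
    intro d o hna hside
    by_cases hO : x = "O"
    · subst hO
      have hxs : noAdj xs ∧ xs.head? ≠ some "." := by
        cases xs with
        | nil => simp [noAdj]
        | cons y ys =>
          obtain ⟨h1, h2⟩ := hna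
          refine ⟨h2, ?_⟩
          intro hy
          exact h1 ⟨rfl, by simpa using hy⟩
      rw [segGo, if_pos rfl, ih d (o + 1) hxs.1 (Or.inr hxs.2)]
      simp [List.replicate_succ' (n := o)]
    · by_cases hD : x = "."
      · subst hD
        have ho : o = 0 := by
          rcases hside with h | h
          · exact h
          · simp at h
        subst ho
        have hxs : noAdj xs := by
          cases xs with
          | nil => trivial
          | cons y ys => exact hna.2
        rw [segGo, if_neg (by simp), if_pos rfl, ih (d + 1) 0 hxs (Or.inl rfl)]
        simp [List.replicate_succ' (n := d)]
      · have hxs : noAdj xs := by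
          cases xs with
          | nil => trivial
          | cons y ys => exact hna.2
        rw [segGo, if_neg hO, if_neg hD, ih 0 0 hxs (Or.inl rfl)]
        simp [flushSeg]

theorem segGo_onePass : ∀ (l : List String) (d o : Nat),
    segGo d o (onePass l).1 = segGo d o l := by
  intro l
  fun_induction onePass l with
  | case1 => intro d o; simp
  | case2 x => intro d o; simp
  | case3 x y rest h ih =>
    intro d o
    obtain ⟨hx, hy⟩ := h; subst hx; subst hy
    show segGo d o ("." :: (onePass ("O" :: rest)).1) = segGo d o ("O" :: "." :: rest)
    rw [segGo, if_neg (by simp), if_pos rfl, ih (d + 1) o]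
    rw [segGo, if_pos rfl, segGo, if_pos rfl, segGo, if_neg (by simp), if_pos rfl]
  | case4 x y rest h r ih =>
    intro d o
    by_cases hO : x = "O"
    · subst hO
      show segGo d o ("O" :: (onePass (y :: rest)).1) = segGo d o ("O" :: y :: rest)
      rw [segGo, if_pos rfl, ih d (o + 1)]
      conv_rhs => rw [segGo]
      rw [if_pos rfl]
    · by_cases hD : x = "."
      · subst hD
        show segGo d o ("." :: (onePass (y :: rest)).1) = segGo d o ("." :: y :: rest)
        rw [segGo, if_neg (by decide), if_pos rfl, ih (d + 1) o]
        conv_rhs => rw [segGo]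
        rw [if_neg (by decide), if_pos rfl]
      · show segGo d o (x :: (onePass (y :: rest)).1) = segGo d o (x :: y :: rest)
        rw [segGo, if_neg hO, if_neg hD, ih 0 0]
        conv_rhs => rw [segGo]
        rw [if_neg hO, if_neg hD]

theorem loopA_eq_segGo : ∀ l : List String, loopA l = segGo 0 0 l := by
  have main : ∀ (n : Nat) (l : List String), phiA l ≤ n → loopA l = segGo 0 0 l := by
    intro n
    induction n with
    | zero =>
      intro l hl
      have hm := (onePass_measure l).2
      have hfalse : (onePass l).2 = false := by
        cases h2 : (onePass l).2
        · rfl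
        · rw [h2] at hm; simp at hm; omega
      rw [loopA]
      rw [dif_neg (by simp [hfalse])]
      obtain ⟨h1, h2⟩ := onePass_false_fix l hfalse
      rw [segGo_noAdj l 0 0 h2 (Or.inl rfl)]
      simpa using h1
    | succ n ih =>
      intro l hl
      rw [loopA]
      by_cases h2 : (onePass l).2 = true
      · rw [dif_pos h2]
        have hm := (onePass_measure l).2
        rw [h2] at hm; simp at hm
        rw [ih (onePass l).1 (by omega), segGo_onePass]
      · rw [dif_neg h2]
        have hfalse : (onePass l).2 = false := by simpa using h2
        obtain ⟨h1, hna⟩ := onePass_false_fix l hfalse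
        rw [segGo_noAdj l 0 0 hna (Or.inl rfl)]
        simpa using h1
  intro l
  exact main (phiA l) l le_rfl

-- ===== VERDICT (by name: the statement is the Claim_ definition above) =====
theorem tiltRocks_spec : Claim_equal_tiltRocks := by
  intro line dir _
  unfold Spec_tiltRocks tiltRocks tiltRocks_alt
  split <;> rw [loopA_eq_segGo]
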